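-- pv_equiv track=rewrite | github.com/hinamuradev/belhard72DV | lesson6/lesson6_7.py | sum_of_neighbors
-- ===== SOURCE A (Python) =====
-- def sum_of_neighbors(numbers):
--     result = []
--     n = len(numbers)
--
--     for i in range(n):
--         left = numbers[(i - 1) % n]
--         right = numbers[(i + 1) % n]
--         result.append(left + right)
--
--     return result
-- ===== SOURCE B (Python) =====
-- def sum_of_neighbors(numbers):
--     left_rot = numbers[-1:] + numbers[:-1]
--     right_rot = numbers[1:] + numbers[:1]
--     return [l + r for l, r in zip(left_rot, right_rot)]
-- ===== Notes on version B (the rewrite author's own statement) =====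
-- stated objective: idiomatic
-- what changed: Replaces the index loop with modular arithmetic by two slice-built rotations of the list zipped and summed elementwise.
import Mathlib
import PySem

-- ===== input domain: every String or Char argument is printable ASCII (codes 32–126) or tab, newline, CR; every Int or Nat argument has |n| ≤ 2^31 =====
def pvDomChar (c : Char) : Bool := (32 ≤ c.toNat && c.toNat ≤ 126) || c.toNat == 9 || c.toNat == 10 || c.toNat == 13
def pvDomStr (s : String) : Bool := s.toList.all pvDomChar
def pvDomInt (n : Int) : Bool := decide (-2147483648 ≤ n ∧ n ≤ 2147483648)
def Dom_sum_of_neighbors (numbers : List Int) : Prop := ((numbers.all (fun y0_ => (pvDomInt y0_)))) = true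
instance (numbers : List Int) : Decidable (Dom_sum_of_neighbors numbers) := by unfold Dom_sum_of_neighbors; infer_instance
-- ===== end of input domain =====

-- B replaces A's index loop with (i±1)%n by zipping two slice-built rotations of the list (idiomatic; same cost).

-- ===== PORT A =====
-- numbers[(i-1)%n] / numbers[(i+1)%n]: index is always in [0, n) inside the loop, so the
-- total pyGetD form (Pre_ InRange holds) is used.
def sum_of_neighbors (numbers : List Int) : List Int :=
  let n : Int := numbers.length
  (PySem.List.pyRange 0 n 1).foldl
    (fun result i =>
      let left := PySem.List.pyGetD numbers (PySem.Int.mod (i - 1) n) 0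
      let right := PySem.List.pyGetD numbers (PySem.Int.mod (i + 1) n) 0
      result ++ [left + right]) []

-- ===== PORT B =====
def sum_of_neighbors_alt (numbers : List Int) : List Int :=
  let leftRot := PySem.List.slice numbers (some (-1)) none ++ PySem.List.slice numbers none (some (-1))
  let rightRot := PySem.List.slice numbers (some 1) none ++ PySem.List.slice numbers none (some 1)
  (leftRot.zip rightRot).map (fun p => p.1 + p.2)

-- ===== PRECONDITION & SPEC =====
def Spec_sum_of_neighbors (numbers : List Int) (out : List Int) : Prop := out = sum_of_neighbors_alt numbers
instance (numbers : List Int) (out : List Int) : Decidable (Spec_sum_of_neighbors numbers out) := by unfold Spec_sum_of_neighbors; infer_instance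

-- ===== CLAIM (what is proved, stated in full; the proofs are below) =====
def Claim_equal_sum_of_neighbors : Prop := ∀ (numbers : List Int), Dom_sum_of_neighbors numbers → Spec_sum_of_neighbors numbers (sum_of_neighbors numbers)

-- ===== LEMMAS AND PROOFS =====

theorem sum_of_neighbors_eq (numbers : List Int) :
    sum_of_neighbors numbers = sum_of_neighbors_alt numbers := by
  by_cases hnil : numbers = []
  · subst hnil; rfl
  have hpos : 0 < numbers.length := List.length_pos_iff.mpr hnil
  unfold sum_of_neighbors sum_of_neighbors_alt
  simp only [PySem.List.foldl_append_singleton_eq_map, PySem.List.slice_from_neg_one,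
    PySem.List.slice_to_neg_one, PySem.List.slice_from_one,
    PySem.List.slice_to numbers (by norm_num : (0:Int) ≤ 1), List.nil_append]
  set n := numbers.length with hn
  have hposI : (0:Int) < (n:Int) := by exact_mod_cast hpos
  apply List.ext_getElem
  · simp [PySem.List.length_pyRange_one, hn]; omega
  intro k hk1 hk2
  have hkn : k < n := by
    simpa [PySem.List.length_pyRange_one, hn] using hk1
  rw [List.getElem_map, List.getElem_map, PySem.List.getElem_pyRange_one, List.getElem_zip]
  have hknI : (k:Int) < (n:Int) := by exact_mod_cast hkn
  have hmodL : PySem.Int.mod ((0:Int) + (k:Int) - 1) (n:Int) = if k = 0 then ((n:Int) - 1) else ((k:Int) - 1) := by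
    rw [PySem.Int.mod_eq_emod_of_pos hposI]
    split
    · next h =>
      subst h
      have h1 : ((0:Int) + (0:Nat) - 1) = ((n:Int) - 1) + (n:Int) * (-1) := by push_cast; ring
      rw [h1, Int.add_mul_emod_self_left]
      exact Int.emod_eq_of_lt (by omega) (by omega)
    · next h =>
      have hk0 : 0 < k := Nat.pos_of_ne_zero h
      have h1 : ((0:Int) + (k:Int) - 1) = ((k:Int) - 1) := by ring
      rw [h1]
      exact Int.emod_eq_of_lt (by omega) (by omega)
  have hmodR : PySem.Int.mod ((0:Int) + (k:Int) + 1) (n:Int) = if k = n - 1 then 0 else ((k:Int) + 1) := by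
    rw [PySem.Int.mod_eq_emod_of_pos hposI]
    split
    · next h =>
      subst h
      have h1 : ((0:Int) + ((n - 1 : Nat):Int) + 1) = (n:Int) := by omega
      rw [h1, Int.emod_self]
    · next h =>
      have hk1 : k + 1 < n := by omega
      have h1 : ((0:Int) + (k:Int) + 1) = ((k:Int) + 1) := by ring
      rw [h1]
      exact Int.emod_eq_of_lt (by omega) (by omega)
  rw [hmodL, hmodR]
  by_cases h0 : k = 0 <;> by_cases hl : k = n - 1
  · rw [if_pos h0, if_pos hl]
    rw [PySem.List.pyGetD_eq_getElem numbers (i := ((n:Int) - 1)) 0 (by omega) (by omega),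
        PySem.List.pyGetD_eq_getElem numbers (i := (0:Int)) 0 (by omega) (by omega)]
    rw [List.getElem_append, List.getElem_append]
    rw [dif_pos (by simp; omega), dif_neg (by simp; omega)]
    rw [List.getElem_drop, List.getElem_take]
    exact congrArg₂ (· + ·) (getElem_congr rfl (by simp; omega) (by omega)) (getElem_congr rfl (by simp; omega) (by omega))
  · rw [if_pos h0, if_neg hl]
    rw [PySem.List.pyGetD_eq_getElem numbers (i := ((n:Int) - 1)) 0 (by omega) (by omega),
        PySem.List.pyGetD_eq_getElem numbers (i := ((k:Int) + 1)) 0 (by omega) (by omega)]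
    rw [List.getElem_append, List.getElem_append]
    rw [dif_pos (by simp; omega), dif_pos (by simp; omega)]
    rw [List.getElem_drop, List.getElem_tail]
    exact congrArg₂ (· + ·) (getElem_congr rfl (by simp; omega) (by omega)) (getElem_congr rfl (by simp) (by omega))
  · rw [if_neg h0, if_pos hl]
    rw [PySem.List.pyGetD_eq_getElem numbers (i := ((k:Int) - 1)) 0 (by omega) (by omega),
        PySem.List.pyGetD_eq_getElem numbers (i := (0:Int)) 0 (by omega) (by omega)]
    rw [List.getElem_append, List.getElem_append]
    rw [dif_neg (by simp; omega), dif_neg (by simp; omega)]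
    rw [List.getElem_dropLast, List.getElem_take]
    exact congrArg₂ (· + ·) (getElem_congr rfl (by simp; omega) (by omega)) (getElem_congr rfl (by simp; omega) (by omega))
  · rw [if_neg h0, if_neg hl]
    rw [PySem.List.pyGetD_eq_getElem numbers (i := ((k:Int) - 1)) 0 (by omega) (by omega),
        PySem.List.pyGetD_eq_getElem numbers (i := ((k:Int) + 1)) 0 (by omega) (by omega)]
    rw [List.getElem_append, List.getElem_append]
    rw [dif_neg (by simp; omega), dif_pos (by simp; omega)]
    rw [List.getElem_dropLast, List.getElem_tail]
    exact congrArg₂ (· + ·) (getElem_congr rfl (by simp; omega) (by omega)) (getElem_congr rfl (by simp) (by omega))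


-- ===== VERDICT (by name: the statement is the Claim_ definition above) =====
theorem sum_of_neighbors_spec : Claim_equal_sum_of_neighbors := by
  intro numbers _
  exact sum_of_neighbors_eq numbers
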